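-- pv_equiv track=rewrite | github.com/ADS-AI/QDup | src/negation.py | check_negation
-- ===== SOURCE A (Python) =====
-- def check_negation(ques1, ques2) :
--   wrong_spellings = {"cannot":"can not", "doesnot":"does not", "couldnot":"could not", "canot":"can not", "wouldnot":"would not", "should not":"should not", "havenot":"have not", "hasnot":"has not", "hadnot":"had not", "arenot":"are not"}
--   articles = set(['a', 'the', 'an'])
--   w1 = ques1.lower().split()
--   w2 = ques2.lower().split()
--   w1 = [w for w in w1 if w not in articles]
--   w2 = [w for w in w2 if w not in articles]
--   w1 = [wrong_spellings[w] if w in wrong_spellings else w for w in w1]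
--   w2 = [wrong_spellings[w] if w in wrong_spellings else w for w in w2]
--   cnt1 = 0
--   cnt2 = 0
--   for i in w1 :
--     if ( i == 'not' ) | ( 'not' in i.split() ) :
--       cnt1+=1
--   for i in w2 :
--     if ( i == 'not' ) | ( 'not' in i.split() ) :
--       cnt2+=1
--   if(cnt1 != cnt2) :
--     return 1
--   return 0
-- ===== SOURCE B (Python) =====
-- NEGATION_TOKENS = {"cannot", "doesnot", "couldnot", "canot", "wouldnot",
--                    "havenot", "hasnot", "hadnot", "arenot"}
--
-- def negation_count(ques):
--     count = 0
--     for token in ques.lower().split():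
--         if token == "not" or token in NEGATION_TOKENS:
--             count += 1
--     return count
--
-- def check_negation(ques1, ques2):
--     return int(negation_count(ques1) != negation_count(ques2))
-- ===== Notes on version B (the rewrite author's own statement) =====
-- stated objective: simpler
-- what changed: Replaces A's four sequential list passes per question (article filter, spelling-substitution map, then a counting loop over 'not' in token.split()) with one shared helper negation_count that makes a single streaming pass incrementing on token == 'not' or token being a space-free misspelling key; the article filter, the substitution map and the inner split vanish because articles never count and every substituted value contributes exactly one 'not'.
import Mathlib
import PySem

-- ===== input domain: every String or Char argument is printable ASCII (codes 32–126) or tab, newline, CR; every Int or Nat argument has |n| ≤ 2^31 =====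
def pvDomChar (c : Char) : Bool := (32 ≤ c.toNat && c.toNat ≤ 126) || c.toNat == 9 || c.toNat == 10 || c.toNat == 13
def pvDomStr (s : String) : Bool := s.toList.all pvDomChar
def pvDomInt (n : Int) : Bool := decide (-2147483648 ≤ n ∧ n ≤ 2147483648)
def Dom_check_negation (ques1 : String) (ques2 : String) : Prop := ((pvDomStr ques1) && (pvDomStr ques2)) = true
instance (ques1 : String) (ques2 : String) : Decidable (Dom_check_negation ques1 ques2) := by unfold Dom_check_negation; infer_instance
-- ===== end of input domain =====

-- B folds A's four passes per question (article filter, misspelling substitution, counting loop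
-- with an inner split) into one shared single-pass counting helper; same return value, not faster.


-- ===== PORT A =====
def check_negation (ques1 : String) (ques2 : String) : Int :=
  let wrong_spellings : PySem.Dict String String := PySem.Dict.ofList
    [("cannot", "can not"), ("doesnot", "does not"), ("couldnot", "could not"),
     ("canot", "can not"), ("wouldnot", "would not"), ("should not", "should not"),
     ("havenot", "have not"), ("hasnot", "has not"), ("hadnot", "had not"), ("arenot", "are not")]
  let articles : PySem.Set String := PySem.Set.ofList ["a", "the", "an"]
  let w1 := PySem.Str.split₀ (PySem.Str.lower ques1)
  let w2 := PySem.Str.split₀ (PySem.Str.lower ques2)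
  let w1 := w1.filter (fun w => !(articles.contains w))
  let w2 := w2.filter (fun w => !(articles.contains w))
  let w1 := w1.map (fun w => if wrong_spellings.contains w then wrong_spellings.getD w w else w)
  let w2 := w2.map (fun w => if wrong_spellings.contains w then wrong_spellings.getD w w else w)
  let cnt1 : Int := w1.foldl (fun c i => if (i == "not") || ((PySem.Str.split₀ i).contains "not") then c + 1 else c) 0
  let cnt2 : Int := w2.foldl (fun c i => if (i == "not") || ((PySem.Str.split₀ i).contains "not") then c + 1 else c) 0
  if cnt1 ≠ cnt2 then 1 else 0

-- ===== PORT B =====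
def NEGATION_TOKENS : PySem.Set String := PySem.Set.ofList
  ["cannot", "doesnot", "couldnot", "canot", "wouldnot", "havenot", "hasnot", "hadnot", "arenot"]

def negation_count (ques : String) : Int :=
  (PySem.Str.split₀ (PySem.Str.lower ques)).foldl
    (fun count token => if token == "not" || NEGATION_TOKENS.contains token then count + 1 else count) 0

def check_negation_alt (ques1 : String) (ques2 : String) : Int :=
  if negation_count ques1 ≠ negation_count ques2 then 1 else 0

-- ===== PRECONDITION & SPEC =====
def Spec_check_negation (ques1 : String) (ques2 : String) (out : Int) : Prop := out = check_negation_alt ques1 ques2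
instance (ques1 : String) (ques2 : String) (out : Int) : Decidable (Spec_check_negation ques1 ques2 out) := by unfold Spec_check_negation; infer_instance

-- ===== CLAIM (what is proved, stated in full; the proofs are below) =====
def Claim_equal_check_negation : Prop := ∀ (ques1 : String) (ques2 : String), Dom_check_negation ques1 ques2 → Spec_check_negation ques1 ques2 (check_negation ques1 ques2)

-- ===== LEMMAS AND PROOFS =====

-- A's per-token predicate, substitution and full per-question count, named for the proof.
def aPred (i : String) : Bool := (i == "not") || ((PySem.Str.split₀ i).contains "not")

def aWrong : PySem.Dict String String := PySem.Dict.ofList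
  [("cannot", "can not"), ("doesnot", "does not"), ("couldnot", "could not"),
   ("canot", "can not"), ("wouldnot", "would not"), ("should not", "should not"),
   ("havenot", "have not"), ("hasnot", "has not"), ("hadnot", "had not"), ("arenot", "are not")]

def aSubst (w : String) : String := if aWrong.contains w then aWrong.getD w w else w

def aCount (q : String) : Int :=
  (((PySem.Str.split₀ (PySem.Str.lower q)).filter
      (fun w => !((PySem.Set.ofList ["a", "the", "an"] : PySem.Set String).contains w))).map aSubst).foldl
    (fun c i => if aPred i then c + 1 else c) 0

def bPred (t : String) : Bool := t == "not" || NEGATION_TOKENS.contains t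

lemma check_negation_eq (q1 q2 : String) :
    check_negation q1 q2 = if aCount q1 ≠ aCount q2 then 1 else 0 := rfl

-- every token produced by split₀ is nonempty and whitespace-free
lemma go_tokens (cs : List Char) :
    ∀ (cur : List Char) (acc : List (List Char)),
    (∀ c ∈ cur, PySem.Chars.isspace c = false) →
    (∀ t ∈ acc, t ≠ [] ∧ ∀ c ∈ t, PySem.Chars.isspace c = false) →
    ∀ t ∈ PySem.Chars.split₀.go cs cur acc, t ≠ [] ∧ ∀ c ∈ t, PySem.Chars.isspace c = false := by
  induction cs with
  | nil =>
    intro cur acc hcur hacc t ht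
    simp only [PySem.Chars.split₀.go] at ht
    by_cases hc : cur.isEmpty = true
    · rw [if_pos hc] at ht
      exact hacc t (List.mem_reverse.mp ht)
    · rw [if_neg hc] at ht
      rw [List.mem_reverse] at ht
      rcases List.mem_cons.mp ht with rfl | ht
      · refine ⟨by simpa [List.isEmpty_iff] using hc, ?_⟩
        intro c hcm
        exact hcur c (List.mem_reverse.mp hcm)
      · exact hacc t ht
  | cons c rest ih =>
    intro cur acc hcur hacc t ht
    simp only [PySem.Chars.split₀.go] at ht
    by_cases hs : PySem.Chars.isspace c = true
    · rw [if_pos hs] at ht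
      by_cases hc : cur.isEmpty = true
      · rw [if_pos hc] at ht
        exact ih [] acc (by simp) hacc t ht
      · rw [if_neg hc] at ht
        refine ih [] (cur.reverse :: acc) (by simp) ?_ t ht
        intro u hu
        rcases List.mem_cons.mp hu with rfl | hu
        · refine ⟨by simpa [List.isEmpty_iff] using hc, ?_⟩
          intro x hx
          exact hcur x (List.mem_reverse.mp hx)
        · exact hacc u hu
    · rw [if_neg hs] at ht
      refine ih (c :: cur) acc ?_ hacc t ht
      intro x hx
      rcases List.mem_cons.mp hx with rfl | hx
      · simpa using hs
      · exact hcur x hx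

lemma split₀_tokens (s : List Char) :
    ∀ t ∈ PySem.Chars.split₀ s, t ≠ [] ∧ ∀ c ∈ t, PySem.Chars.isspace c = false := by
  intro t ht
  exact go_tokens s [] [] (by simp) (by simp) t ht

lemma go_nospace (cs : List Char) :
    ∀ (cur : List Char) (acc : List (List Char)),
    (∀ c ∈ cs, PySem.Chars.isspace c = false) →
    PySem.Chars.split₀.go cs cur acc = PySem.Chars.split₀.go [] (cs.reverse ++ cur) acc := by
  induction cs with
  | nil => intro cur acc _; simp
  | cons c rest ih =>
    intro cur acc h
    have hc : PySem.Chars.isspace c = false := h c (by simp)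
    have e1 : PySem.Chars.split₀.go (c :: rest) cur acc = PySem.Chars.split₀.go rest (c :: cur) acc := by
      simp only [PySem.Chars.split₀.go, hc, Bool.false_eq_true, if_false]
    rw [e1, ih (c :: cur) acc (fun x hx => h x (by simp [hx]))]
    have e2 : rest.reverse ++ c :: cur = (c :: rest).reverse ++ cur := by simp
    rw [e2]

lemma split₀_singleton (cs : List Char) (hne : cs ≠ [])
    (h : ∀ c ∈ cs, PySem.Chars.isspace c = false) :
    PySem.Chars.split₀ cs = [cs] := by
  unfold PySem.Chars.split₀
  rw [go_nospace cs [] [] h]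
  simp only [PySem.Chars.split₀.go, List.append_nil]
  simp [hne]

lemma str_split₀_singleton (t : String) (hne : t.toList ≠ [])
    (h : ∀ c ∈ t.toList, PySem.Chars.isspace c = false) :
    PySem.Str.split₀ t = [t] := by
  unfold PySem.Str.split₀
  rw [split₀_singleton t.toList hne h]
  simp

-- counting fold = countP, over Int
lemma foldl_count (p : String → Bool) (l : List String) (c : Int) :
    l.foldl (fun c i => if p i then c + 1 else c) c = c + (l.countP p : Int) := by
  induction l generalizing c with
  | nil => simp
  | cons x xs ih =>
    by_cases hx : p x
    · simp [List.foldl, hx, ih]; ring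
    · simp [List.foldl, hx, ih]

-- the per-token identity, for a nonempty whitespace-free token
lemma token_eq (t : String) (hne : t.toList ≠ [])
    (hws : ∀ c ∈ t.toList, PySem.Chars.isspace c = false) :
    (aPred (aSubst t) && !((PySem.Set.ofList ["a", "the", "an"] : PySem.Set String).contains t)) = bPred t := by
  by_cases h1 : t = "a"
  · subst h1; decide
  by_cases h2 : t = "the"
  · subst h2; decide
  by_cases h3 : t = "an"
  · subst h3; decide
  by_cases h4 : t = "cannot"
  · subst h4; decide
  by_cases h5 : t = "doesnot"
  · subst h5; decide
  by_cases h6 : t = "couldnot"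
  · subst h6; decide
  by_cases h7 : t = "canot"
  · subst h7; decide
  by_cases h8 : t = "wouldnot"
  · subst h8; decide
  by_cases h9 : t = "havenot"
  · subst h9; decide
  by_cases h10 : t = "hasnot"
  · subst h10; decide
  by_cases h11 : t = "hadnot"
  · subst h11; decide
  by_cases h12 : t = "arenot"
  · subst h12; decide
  by_cases h13 : t = "not"
  · subst h13; decide
  -- residual case: t is none of the literals, and (being whitespace-free) not "should not" either
  have hsn : t ≠ "should not" := by
    intro he
    have hmem : ' ' ∈ t.toList := by rw [he]; decide
    have := hws ' ' hmem
    exact absurd this (by decide)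
  have harts : (PySem.Set.ofList ["a", "the", "an"] : PySem.Set String).contains t = false := by
    simp only [PySem.Set.contains]
    rw [show (PySem.Set.ofList ["a", "the", "an"] : PySem.Set String) = ["a", "the", "an"] from by decide]
    rw [List.contains_eq_mem]
    simp [h1, h2, h3]
  have hwc : aWrong.contains t = false := by
    simp only [PySem.Dict.contains]
    rw [show aWrong.items =
      [("cannot", "can not"), ("doesnot", "does not"), ("couldnot", "could not"),
       ("canot", "can not"), ("wouldnot", "would not"), ("should not", "should not"),
       ("havenot", "have not"), ("hasnot", "has not"), ("hadnot", "had not"), ("arenot", "are not")] from by decide]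
    simp only [List.any_cons, List.any_nil, Bool.or_eq_false_iff, beq_eq_false_iff_ne]
    exact ⟨fun he => h4 he.symm, fun he => h5 he.symm, fun he => h6 he.symm, fun he => h7 he.symm,
      fun he => h8 he.symm, fun he => hsn he.symm, fun he => h9 he.symm, fun he => h10 he.symm,
      fun he => h11 he.symm, fun he => h12 he.symm, trivial⟩
  have hkeys : NEGATION_TOKENS.contains t = false := by
    simp only [PySem.Set.contains]
    rw [show NEGATION_TOKENS =
      ["cannot", "doesnot", "couldnot", "canot", "wouldnot", "havenot", "hasnot", "hadnot", "arenot"] from by decide]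
    rw [List.contains_eq_mem]
    simp [h4, h5, h6, h7, h8, h9, h10, h11, h12]
  have hsubst : aSubst t = t := by simp [aSubst, hwc]
  have hnot : (t == "not") = false := by rw [beq_eq_false_iff_ne]; exact h13
  have hsplit : PySem.Str.split₀ t = [t] := str_split₀_singleton t hne hws
  have hcont : ([t].contains "not") = false := by
    rw [List.contains_eq_mem]
    simp only [List.mem_singleton, decide_eq_false_iff_not]
    exact fun he => h13 he.symm
  simp only [aPred, bPred, hsubst, hsplit, hcont, hnot, harts, hkeys, Bool.or_false,
    Bool.not_false, Bool.and_true]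

lemma aCount_eq (q : String) : aCount q = negation_count q := by
  unfold aCount negation_count
  rw [foldl_count, foldl_count]
  congr 1
  rw [List.countP_map, List.countP_filter]
  refine congrArg _ (List.countP_congr ?_)
  intro t ht
  have hmem : t.toList ∈ PySem.Chars.split₀ (PySem.Str.lower q).toList := by
    rw [← PySem.Str.split₀_map_toList]
    exact List.mem_map_of_mem ht
  have h := split₀_tokens _ _ hmem
  have hx : ((aPred ∘ aSubst) t && !((PySem.Set.ofList ["a", "the", "an"] : PySem.Set String).contains t)) = bPred t :=
    token_eq t h.1 h.2
  constructor
  · intro hy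
    have hb : bPred t = true := by rw [← hx]; exact hy
    exact hb
  · intro hy
    rw [hx]
    exact hy

lemma check_negation_alt_eq (q1 q2 : String) :
    check_negation_alt q1 q2 = if aCount q1 ≠ aCount q2 then 1 else 0 := by
  unfold check_negation_alt
  rw [aCount_eq, aCount_eq]

-- ===== VERDICT (by name: the statement is the Claim_ definition above) =====
theorem check_negation_spec : Claim_equal_check_negation := by
  intro q1 q2 _
  show check_negation q1 q2 = check_negation_alt q1 q2
  rw [check_negation_eq, check_negation_alt_eq]
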